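-- pv_equiv track=rewrite | github.com/lobabobloblaw/peer-calendar | scripts/generate_calendar.py | fold_ical_line
-- ===== SOURCE A (Python) =====
-- def fold_ical_line(line: str, max_length: int = 75) -> str:
--     """Fold long lines according to iCal spec."""
--     if len(line) <= max_length:
--         return line
--
--     result = []
--     while len(line) > max_length:
--         result.append(line[:max_length])
--         line = " " + line[max_length:]
--     result.append(line)
--     return "\r\n".join(result)
-- ===== SOURCE B (Python) =====
-- def fold_ical_line(line: str, max_length: int = 75) -> str:
--     """Fold long lines according to iCal spec."""
--     if len(line) <= max_length:
--         return line
--     head = line[:max_length]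
--     rest = line[max_length:]
--     step = max_length - 1
--     segments = [head] + [" " + rest[i:i + step] for i in range(0, len(rest), step)]
--     return "\r\n".join(segments)
-- ===== Notes on version B (the rewrite author's own statement) =====
-- stated objective: alternative
-- what changed: Replaces A's mutate-and-reslice while loop (which rebuilds the remaining string each iteration) with a one-shot head/stride decomposition: split once into head and rest, then emit the continuation segments at fixed index boundaries with a stride of max_length-1.
import Mathlib
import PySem

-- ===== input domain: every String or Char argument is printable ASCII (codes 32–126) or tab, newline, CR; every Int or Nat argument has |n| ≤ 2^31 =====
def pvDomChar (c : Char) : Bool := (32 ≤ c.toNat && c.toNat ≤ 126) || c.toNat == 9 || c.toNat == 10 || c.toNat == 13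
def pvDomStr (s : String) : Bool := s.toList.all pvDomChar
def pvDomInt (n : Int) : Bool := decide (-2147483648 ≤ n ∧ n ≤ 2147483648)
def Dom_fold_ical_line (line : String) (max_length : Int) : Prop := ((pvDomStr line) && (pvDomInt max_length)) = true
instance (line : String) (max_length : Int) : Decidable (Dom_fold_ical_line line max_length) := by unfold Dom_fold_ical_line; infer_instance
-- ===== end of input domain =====

-- B replaces A's mutate-and-reslice while loop with a one-shot head/stride decomposition
-- over fixed index boundaries (objective: alternative, same asymptotic behaviour here).

-- ===== PORT A =====
-- A's while loop, transliterated with fuel = number of remaining characters (an upper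
-- bound on the iteration count whenever 2 ≤ max_length; under Pre_ the fuel never runs out).
def foldALoop (fuel : Nat) (line : List Char) (max_length : Int) (result : List (List Char)) :
    List (List Char) :=
  match fuel with
  | 0 => result ++ [line]
  | fuel + 1 =>
    if max_length < (line.length : Int) then
      foldALoop fuel (' ' :: PySem.List.slice line (some max_length) none) max_length
        (result ++ [PySem.List.slice line none (some max_length)])
    else
      result ++ [line]

def fold_ical_line (line : String) (max_length : Int) : String :=
  if PySem.Str.len line ≤ max_length then line
  else
    String.ofList (PySem.Chars.join ['\r', '\n']
      (foldALoop line.toList.length line.toList max_length []))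

-- ===== PORT B =====
def fold_ical_line_alt (line : String) (max_length : Int) : String :=
  if PySem.Str.len line ≤ max_length then line
  else
    let head := PySem.List.slice line.toList none (some max_length)
    let rest := PySem.List.slice line.toList (some max_length) none
    let step := max_length - 1
    let segments := head ::
      (PySem.List.pyRange 0 (rest.length : Int) step).map
        (fun i => ' ' :: PySem.List.slice rest (some i) (some (i + step)))
    String.ofList (PySem.Chars.join ['\r', '\n'] segments)

-- ===== PRECONDITION & SPEC =====
-- Pre_ excludes exactly the inputs on which A never returns: when len(line) > max_length
-- and max_length ≤ 1, A's while loop never shortens the line and diverges.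
def Pre_fold_ical_line (line : String) (max_length : Int) : Prop :=
  PySem.Str.len line ≤ max_length ∨ 2 ≤ max_length
instance (line : String) (max_length : Int) : Decidable (Pre_fold_ical_line line max_length) := by
  unfold Pre_fold_ical_line; infer_instance

def pvWitness_fold_ical_line : String × Int := ("SUMMARY:a longer event title", 10)

def Spec_fold_ical_line (line : String) (max_length : Int) (out : String) : Prop :=
  out = fold_ical_line_alt line max_length
instance (line : String) (max_length : Int) (out : String) :
    Decidable (Spec_fold_ical_line line max_length out) := by
  unfold Spec_fold_ical_line; infer_instance

-- ===== CLAIM (what is proved, stated in full; the proofs are below) =====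
def Claim_equal_fold_ical_line : Prop :=
  ∀ (line : String) (max_length : Int), Dom_fold_ical_line line max_length →
    Pre_fold_ical_line line max_length →
    Spec_fold_ical_line line max_length (fold_ical_line line max_length)

-- ===== LEMMAS AND PROOFS =====

-- continuation segments written over Nat indices: segment j is ' ' plus the k-character
-- window of r starting at k*j
def contsN (n k : Nat) (r : List Char) : List (List Char) :=
  (List.range n).map (fun j => ' ' :: (r.drop (k * j)).take k)

theorem contsN_succ (n k : Nat) (r : List Char) :
    contsN (n + 1) k r = (' ' :: r.take k) :: contsN n k (r.drop k) := by
  unfold contsN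
  rw [List.range_succ_eq_map]
  simp [List.map_map, Function.comp_def, Nat.mul_succ, List.drop_drop, Nat.add_comm]

-- ceiling division (number of continuation segments)
def ceilN (L k : Nat) : Nat := (L + k - 1) / k

theorem ceilN_one (L k : Nat) (h1 : 0 < L) (h2 : L ≤ k) : ceilN L k = 1 := by
  unfold ceilN
  exact Nat.div_eq_of_lt_le (by omega) (by omega)

theorem ceilN_step (L k : Nat) (hk : 0 < k) (h : k < L) :
    ceilN L k = ceilN (L - k) k + 1 := by
  unfold ceilN
  have h1 : L + k - 1 = (L - k + k - 1) + k := by omega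
  rw [h1, Nat.add_div_right _ hk]

-- A's loop, under Pre_, produces head :: contsN segments
theorem foldALoop_eq (fuel : Nat) :
    ∀ (cs : List Char) (m : Int) (acc : List (List Char)), 2 ≤ m →
      cs.length ≤ fuel → m < (cs.length : Int) →
      foldALoop fuel cs m acc =
        acc ++ cs.take m.toNat ::
          contsN (ceilN (cs.length - m.toNat) (m.toNat - 1)) (m.toNat - 1) (cs.drop m.toNat) := by
  induction fuel with
  | zero =>
    intro cs m acc hm hfuel hlen
    have : cs.length = 0 := Nat.le_zero.mp hfuel
    omega
  | succ fuel ih =>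
    intro cs m acc hm hfuel hlen
    have hm0 : (0:Int) ≤ m := by omega
    have hmn : 2 ≤ m.toNat := by omega
    have hlen' : m.toNat < cs.length := by omega
    set m' := m.toNat with hm'
    set k := m' - 1 with hk
    set r := cs.drop m' with hr
    have hrlen : r.length = cs.length - m' := by simp [hr]
    have hL : 0 < r.length := by omega
    rw [foldALoop]
    rw [if_pos hlen]
    rw [PySem.List.slice_from _ hm0, PySem.List.slice_to _ hm0]
    by_cases hcase : (' ' :: r).length ≤ m'
    · -- the continuation fits: the loop exits on the next test
      have hrk : r.length ≤ k := by simp at hcase; omega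
      have hexit : ¬ m < (((' ' :: cs.drop m.toNat).length : Nat) : Int) := by
        simp only [List.length_cons]
        rw [← hm', ← hr]
        push_cast
        omega
      match fuel with
      | 0 =>
        exfalso
        simp at hfuel
        omega
      | fuel + 1 =>
        rw [foldALoop, if_neg hexit, ← hrlen]
        rw [ceilN_one r.length k hL hrk]
        have : contsN 1 k r = [' ' :: r] := by
          unfold contsN
          simp [List.take_of_length_le hrk]
        rw [this]
        simp [hr]
        rfl
    · -- still too long: recurse and use the IH
      have hrec : m < (((' ' :: cs.drop m.toNat).length : Nat) : Int) := by
        simp only [List.length_cons]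
        rw [← hm', ← hr]
        push_cast
        simp at hcase
        omega
      have hfuel' : (' ' :: cs.drop m.toNat).length ≤ fuel := by
        simp only [List.length_cons]
        rw [← hm', ← hr]
        omega
      rw [ih _ m _ hm hfuel' hrec]
      have htake : (' ' :: cs.drop m').take m' = ' ' :: r.take k := by
        match hm2 : m' with
        | m'' + 1 => simp [hr, hk]
      have hdrop : (' ' :: cs.drop m').drop m' = r.drop k := by
        match hm2 : m' with
        | m'' + 1 => simp [hr, hk, List.drop_drop]
      rw [← hm', htake, hdrop]
      have hlen2 : (' ' :: cs.drop m').length - m' = r.length - k := by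
        simp [hr]; omega
      rw [hlen2, ← hrlen]
      have hkL : k < r.length := by simp at hcase; omega
      rw [ceilN_step r.length k (by omega) hkL, contsN_succ]
      simp
      rfl

-- B's pyRange comprehension is contsN with the ceiling count
theorem conts_pyRange_eq (r : List Char) (m : Int) (hm : 2 ≤ m) (hL : 0 < r.length) :
    (PySem.List.pyRange 0 (r.length : Int) (m - 1)).map
        (fun i => ' ' :: PySem.List.slice r (some i) (some (i + (m - 1)))) =
      contsN (ceilN r.length (m.toNat - 1)) (m.toNat - 1) r := by
  have hs : (0:Int) < m - 1 := by omega
  rw [PySem.List.pyRange_of_pos 0 (r.length : Int) hs]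
  rw [List.map_map]
  unfold contsN
  have hcount : (if (0:Int) < (r.length : Int) then
      (((r.length : Int) - 0 + (m - 1) - 1) / (m - 1)).toNat else 0) =
      ceilN r.length (m.toNat - 1) := by
    rw [if_pos (by exact_mod_cast hL)]
    unfold ceilN
    have h1 : ((r.length : Int) - 0 + (m - 1) - 1) = ((r.length + (m.toNat - 1) - 1 : Nat) : Int) := by
      omega
    have h2 : (m - 1) = ((m.toNat - 1 : Nat) : Int) := by omega
    rw [h1, h2, ← Int.natCast_div, Int.toNat_natCast]
  rw [hcount]
  apply List.map_congr_left
  intro j hj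
  simp only [Function.comp_def]
  have hts : ((m.toNat - 1 : Nat) : Int) = m - 1 := by omega
  have h3 : (0 + (m - 1) * (j : Int)) = (((m.toNat - 1) * j : Nat) : Int) := by
    rw [Nat.cast_mul, hts]; ring
  have h4 : ((((m.toNat - 1) * j : Nat) : Int) + (m - 1)) = ((((m.toNat - 1) * j + (m.toNat - 1)) : Nat) : Int) := by
    rw [Nat.cast_add, hts]
  rw [h3, h4, PySem.List.slice_natCast]
  simp

-- ===== VERDICT (by name: the statement is the Claim_ definition above) =====
theorem fold_ical_line_spec : Claim_equal_fold_ical_line := by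
  intro line m _hdom hpre
  unfold Spec_fold_ical_line fold_ical_line fold_ical_line_alt
  by_cases hle : PySem.Str.len line ≤ m
  · rw [if_pos hle, if_pos hle]
  · rw [if_neg hle, if_neg hle]
    have hm : 2 ≤ m := by
      rcases hpre with h | h
      · exact absurd h hle
      · exact h
    have hm0 : (0:Int) ≤ m := by omega
    have hlen : m < (line.toList.length : Int) := by
      rw [PySem.Str.len_eq] at hle
      omega
    congr 1
    rw [foldALoop_eq line.toList.length line.toList m [] hm (le_refl _) hlen]
    rw [PySem.List.slice_from _ hm0, PySem.List.slice_to _ hm0]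
    have hL : 0 < (line.toList.drop m.toNat).length := by
      rw [List.length_drop]
      omega
    rw [conts_pyRange_eq (line.toList.drop m.toNat) m hm hL]
    simp
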